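-- pv_equiv track=rewrite | github.com/Alexis-9/ayed1-2025-tps | TP6/Ej5/Ejercicio5.py | formato2
-- ===== SOURCE A (Python) =====
-- def formato2(linea: str) -> list[str]:
--     """
--     Extrae campos de una línea donde cada campo empieza con dos dígitos que indican su longitud
--
--     Pre:
--     - Recibe una cadena donde cada campo está formado por: dos dígitos de longitud y el texto del campo
--     - La línea debe respetar ese formato para poder separarse bien
--
--     Post:
--     - Devuelve una lista con todos los campos extraídos en el orden en que aparecen
--     - Avanza por la línea leyendo primero el largo y después el contenido del campo
--     -Funciona incluso si se agregan más campos
--     """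
--
--     campos=[]
--     posicion=0
--     while posicion +2 <= len(linea):
--         largo=int(linea[posicion:posicion+2])
--         posicion+=2
--
--         campos.append(linea[posicion:posicion+largo])
--
--         posicion+=largo
--
--     return campos
-- ===== SOURCE B (Python) =====
-- def formato2(linea: str) -> list[str]:
--     """Recursive head-consuming parse of length-prefixed fields."""
--     if len(linea) < 2:
--         return []
--     largo = int(linea[:2])
--     return [linea[2:2 + largo]] + formato2(linea[2 + largo:])
-- ===== Notes on version B (the rewrite author's own statement) =====
-- stated objective: simpler
-- what changed: Replaced the index-cursor while loop with acc list by a head-consuming recursion: read the two-char length, cut the field, recurse on the remaining suffix.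
-- outside the precondition, e.g. on formato2('-1'): A returns [''], B returns ['']
import Mathlib
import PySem

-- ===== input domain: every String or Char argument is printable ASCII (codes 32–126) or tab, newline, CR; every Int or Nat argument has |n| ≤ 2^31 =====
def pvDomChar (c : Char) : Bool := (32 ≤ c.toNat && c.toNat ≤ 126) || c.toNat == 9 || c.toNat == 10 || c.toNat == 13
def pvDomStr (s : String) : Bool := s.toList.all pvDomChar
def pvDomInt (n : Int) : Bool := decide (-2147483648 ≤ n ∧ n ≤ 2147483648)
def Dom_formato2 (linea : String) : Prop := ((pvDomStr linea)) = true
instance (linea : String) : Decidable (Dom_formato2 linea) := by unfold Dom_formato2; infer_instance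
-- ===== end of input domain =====

-- B re-decomposes A's index-cursor loop as recursion consuming the head of the string (objective: simpler).

-- ===== PORT A =====
-- Iterative cursor loop; 'posicion' is kept as a Nat: inside Pre_ every length prefix is
-- a nonnegative int, so 'largo.toNat = largo' and the cursor matches Python's exactly.
-- Where int() would raise, PySem.Int.ofChars? is none and the loop stops (outside Pre_).
def formato2Go (cs : List Char) (pos : Nat) (campos : List String) : List String :=
  if h : pos + 2 ≤ cs.length then
    match PySem.Int.ofChars? (PySem.List.slice cs (some (pos : Int)) (some ((pos : Int) + 2))) with
    | none => campos
    | some largo =>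
        formato2Go cs (pos + 2 + largo.toNat)
          (campos ++ [String.ofList (PySem.List.slice cs (some ((pos : Int) + 2)) (some ((pos : Int) + 2 + largo)))])
  else campos
termination_by cs.length - pos
decreasing_by omega

def formato2 (linea : String) : List String := formato2Go linea.toList 0 []

-- ===== PORT B =====
-- Head-consuming recursion: read the two-digit length, cut the field, recurse on the rest.
def formato2AltGo (cs : List Char) : List String :=
  if h : cs.length < 2 then []
  else
    match PySem.Int.ofChars? (cs.take 2) with
    | none => []  -- Python B raises here (outside Pre_)
    | some largo =>
        String.ofList ((cs.drop 2).take largo.toNat) :: formato2AltGo (cs.drop (2 + largo.toNat))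
termination_by cs.length
decreasing_by simp [List.length_drop]; omega

def formato2_alt (linea : String) : List String := formato2AltGo linea.toList

-- ===== PRECONDITION & SPEC =====
-- Pre_ is the length-prefixed grammar the docstring states: repeatedly, either fewer than two
-- characters remain (trailing tail is ignored) or the next two characters parse as a
-- NONNEGATIVE Python int giving the length of the next field (the skip counter consumes that
-- field).  It excludes inputs where a prefix is not an int literal (A raises ValueError) or
-- parses negative (the cursor can move backwards, so A loops forever on e.g. "-2xx"; on some
-- such inputs, e.g. "-1", A happens to return -- B returns the same value there).
def formato2FmtGo : Nat → List Char → Bool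
  | 0, [] => true
  | 0, [_] => true
  | 0, a :: b :: rest =>
      match PySem.Int.ofChars? [a, b] with
      | none => false
      | some largo => decide (0 ≤ largo) && formato2FmtGo largo.toNat rest
  | _ + 1, [] => true
  | k + 1, _ :: cs => formato2FmtGo k cs
termination_by structural _ cs => cs

def Pre_formato2 (linea : String) : Prop := formato2FmtGo 0 linea.toList = true
instance (linea : String) : Decidable (Pre_formato2 linea) := by unfold Pre_formato2; infer_instance

def pvWitness_formato2 : String := "02ab03xyz"

def Spec_formato2 (linea : String) (out : List String) : Prop := out = formato2_alt linea
instance (linea : String) (out : List String) : Decidable (Spec_formato2 linea out) := by unfold Spec_formato2; infer_instance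

-- ===== CLAIM (what is proved, stated in full; the proofs are below) =====
def Claim_equal_formato2 : Prop := ∀ (linea : String), Dom_formato2 linea → Pre_formato2 linea → Spec_formato2 linea (formato2 linea)

-- ===== LEMMAS AND PROOFS =====

lemma formato2FmtGo_skip : ∀ (cs : List Char) (k : Nat), formato2FmtGo k cs = formato2FmtGo 0 (cs.drop k) := by
  intro cs
  induction cs with
  | nil => intro k; cases k <;> rfl
  | cons c cs ih =>
      intro k
      cases k with
      | zero => rfl
      | succ k => simpa using ih k

lemma formato2_key (cs : List Char) :
    ∀ (n pos : Nat) (campos : List String), cs.length - pos ≤ n →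
      formato2FmtGo 0 (cs.drop pos) = true →
      formato2Go cs pos campos = campos ++ formato2AltGo (cs.drop pos) := by
  intro n
  induction n with
  | zero =>
      intro pos campos hle _
      rw [formato2Go, formato2AltGo]
      have h2 : ¬ (pos + 2 ≤ cs.length) := by omega
      have h3 : (cs.drop pos).length < 2 := by simp [List.length_drop]; omega
      simp only [dif_neg h2, dif_pos h3, List.append_nil]
  | succ n ih =>
      intro pos campos hle hfmt
      rw [formato2Go]
      by_cases h2 : pos + 2 ≤ cs.length
      · have hlen : ¬ ((cs.drop pos).length < 2) := by simp [List.length_drop]; omega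
        obtain ⟨a, b, rest, hdp⟩ : ∃ a b rest, cs.drop pos = a :: b :: rest := by
          match hcs : cs.drop pos with
          | [] => rw [hcs] at hlen; simp at hlen
          | [x] => rw [hcs] at hlen; simp at hlen
          | x :: y :: r => exact ⟨x, y, r, rfl⟩
        have htake : (cs.drop pos).take 2 = [a, b] := by rw [hdp]; rfl
        have hslice :
            PySem.List.slice cs (some (pos : Int)) (some ((pos : Int) + 2)) = (cs.drop pos).take 2 := by
          have : ((pos : Int) + 2) = ((pos + 2 : Nat) : Int) := by push_cast; ring
          rw [this, PySem.List.slice_natCast]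
          congr 1; omega
        rw [hdp, formato2FmtGo] at hfmt
        rw [formato2AltGo]
        simp only [dif_neg hlen, hslice, htake]
        cases hof : PySem.Int.ofChars? [a, b] with
        | none => rw [hof] at hfmt; simp at hfmt
        | some largo =>
            rw [hof] at hfmt
            simp only [Bool.and_eq_true, decide_eq_true_eq] at hfmt
            obtain ⟨hnn, hrest⟩ := hfmt
            rw [formato2FmtGo_skip] at hrest
            simp only [dif_pos h2]
            have hdd : rest.drop largo.toNat = cs.drop (pos + 2 + largo.toNat) := by
              have h6 : cs.drop (pos + 2 + largo.toNat) = (cs.drop pos).drop (2 + largo.toNat) := by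
                rw [List.drop_drop]; congr 1; omega
              have h7 : (a :: b :: rest).drop (2 + largo.toNat) = rest.drop largo.toNat := by
                have : 2 + largo.toNat = largo.toNat + 1 + 1 := by omega
                rw [this]
                simp [List.drop_succ_cons]
              rw [h6, hdp, h7]
            have hcampo :
                PySem.List.slice cs (some ((pos : Int) + 2)) (some ((pos : Int) + 2 + largo))
                  = rest.take largo.toNat := by
              have e1 : ((pos : Int) + 2) = ((pos + 2 : Nat) : Int) := by push_cast; ring
              have e2 : (((pos + 2 : Nat) : Int) + largo) = ((pos + 2 + largo.toNat : Nat) : Int) := by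
                push_cast; omega
              rw [e1, e2, PySem.List.slice_natCast]
              have h4 : pos + 2 + largo.toNat - (pos + 2) = largo.toNat := by omega
              have h5 : cs.drop (pos + 2) = rest := by
                have : cs.drop (pos + 2) = (cs.drop pos).drop 2 := by
                  simp [List.drop_drop]
                rw [this, hdp]
                simp
              rw [h4, h5]
            rw [hcampo]
            rw [ih (pos + 2 + largo.toNat) _ (by omega) (by rw [hdd] at hrest; exact hrest)]
            have hA : (cs.drop pos).drop 2 = rest := by rw [hdp]; simp
            have hB : (cs.drop pos).drop (2 + largo.toNat) = cs.drop (pos + 2 + largo.toNat) := by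
              rw [List.drop_drop]; congr 1; omega
            rw [hA, hB]
            simp
      · have h3 : (cs.drop pos).length < 2 := by simp [List.length_drop]; omega
        rw [formato2AltGo]
        simp only [dif_neg h2, dif_pos h3, List.append_nil]

-- ===== VERDICT (by name: the statement is the Claim_ definition above) =====
theorem formato2_spec : Claim_equal_formato2 := by
  intro linea _ hpre
  unfold Spec_formato2 formato2 formato2_alt
  have := formato2_key linea.toList linea.toList.length 0 [] (by omega) (by simpa using hpre)
  simpa using this
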